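-- pv_equiv track=rewrite | github.com/Sicambr/igorek | to_s191.py | get_number_after_letter
-- ===== SOURCE A (Python) =====
-- def get_number_after_letter(line, letter):
--     value = letter
--     allow_symbols = '0123456789.-'
--     for symbol in line.partition(letter)[2]:
--         if symbol in allow_symbols:
--             value += symbol
--         else:
--             break
--     return value
-- ===== SOURCE B (Python) =====
-- def get_number_after_letter(line, letter):
--     i = line.find(letter)
--     tail = "" if i < 0 else line[i + len(letter):]
--     stop = next((k for k, c in enumerate(tail) if c not in '0123456789.-'), len(tail))
--     return letter + tail[:stop]
-- ===== Notes on version B (the rewrite author's own statement) =====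
-- stated objective: idiomatic
-- what changed: B replaces A's accumulate-until-break loop by computing the index of the first non-numeric character (first-violation index) and slicing the tail prefix, using find instead of partition.
import Mathlib
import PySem

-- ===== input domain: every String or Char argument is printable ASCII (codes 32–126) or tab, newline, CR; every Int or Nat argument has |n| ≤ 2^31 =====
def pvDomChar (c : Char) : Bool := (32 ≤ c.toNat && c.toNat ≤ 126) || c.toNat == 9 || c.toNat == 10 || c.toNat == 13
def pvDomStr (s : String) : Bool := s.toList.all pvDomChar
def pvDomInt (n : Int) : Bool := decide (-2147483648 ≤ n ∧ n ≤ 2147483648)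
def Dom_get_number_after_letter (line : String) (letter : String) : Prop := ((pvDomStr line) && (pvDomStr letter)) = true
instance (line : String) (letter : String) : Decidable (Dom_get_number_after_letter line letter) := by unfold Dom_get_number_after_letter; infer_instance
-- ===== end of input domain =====

-- B computes the first-violation index of the tail and slices, instead of A's accumulate-until-break loop; objective: idiomatic.


-- allow_symbols = '0123456789.-'; 'symbol in allow_symbols' for a single char is exactly list membership
def pvAllow : List Char := "0123456789.-".toList

-- ===== PORT A =====
-- line.partition(letter)[2] for letter ≠ "": hand port, exact — first occurrence via PySem.Chars.find,
-- tail = everything after it, or "" when letter is absent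
def pvPartTail (s pat : List Char) : List Char :=
  let i := PySem.Chars.find s pat
  if i = -1 then [] else s.drop (i.toNat + pat.length)

-- A's loop: value starts as letter, appends allowed chars, breaks at the first disallowed one
def pvScanA (acc : List Char) : List Char → List Char
  | [] => acc
  | c :: rest => if pvAllow.contains c then pvScanA (acc ++ [c]) rest else acc

def get_number_after_letter (line : String) (letter : String) : String :=
  String.ofList (pvScanA letter.toList (pvPartTail line.toList letter.toList))

-- ===== PORT B =====
-- next((k for k, c in enumerate(tail) if c not in allow), len(tail)): first index of a disallowed char, else length
def pvFirstBad : List Char → Nat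
  | [] => 0
  | c :: rest => if !(pvAllow.contains c) then 0 else 1 + pvFirstBad rest

def get_number_after_letter_alt (line : String) (letter : String) : String :=
  -- i = line.find(letter); tail = "" if i < 0 else line[i + len(letter):]  (exact: find gives first index)
  let i := PySem.Chars.find line.toList letter.toList
  let tail := if i < 0 then [] else line.toList.drop (i.toNat + letter.toList.length)
  let stop := pvFirstBad tail
  -- tail[:stop] with 0 ≤ stop ≤ len(tail) is exactly take
  String.ofList (letter.toList ++ tail.take stop)

-- ===== PRECONDITION & SPEC =====
-- letter = "" makes A's str.partition raise ValueError ('empty separator'); excluded.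
def Pre_get_number_after_letter (line : String) (letter : String) : Prop := letter ≠ ""
instance (line : String) (letter : String) : Decidable (Pre_get_number_after_letter line letter) := by unfold Pre_get_number_after_letter; infer_instance
def pvWitness_get_number_after_letter : String × String := ("x12.5y", "x")

def Spec_get_number_after_letter (line : String) (letter : String) (out : String) : Prop := out = get_number_after_letter_alt line letter
instance (line : String) (letter : String) (out : String) : Decidable (Spec_get_number_after_letter line letter out) := by unfold Spec_get_number_after_letter; infer_instance

-- ===== CLAIM (what is proved, stated in full; the proofs are below) =====
def Claim_equal_get_number_after_letter : Prop := ∀ (line : String) (letter : String), Dom_get_number_after_letter line letter → Pre_get_number_after_letter line letter → Spec_get_number_after_letter line letter (get_number_after_letter line letter)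
-- ===== LEMMAS AND PROOFS =====

-- A's break-loop equals acc ++ the prefix up to the first disallowed character
theorem pvScanA_eq_take (tail : List Char) : ∀ acc : List Char,
    pvScanA acc tail = acc ++ tail.take (pvFirstBad tail) := by
  induction tail with
  | nil => intro acc; simp [pvScanA, pvFirstBad]
  | cons c rest ih =>
    intro acc
    by_cases h : c ∈ pvAllow
    · simp [pvScanA, pvFirstBad, h, ih, Nat.add_comm, List.append_assoc]
    · simp [pvScanA, pvFirstBad, h]

-- ===== VERDICT (by name: the statement is the Claim_ definition above) =====
theorem get_number_after_letter_spec : Claim_equal_get_number_after_letter := by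
  intro line letter _ hpre
  unfold Spec_get_number_after_letter get_number_after_letter get_number_after_letter_alt pvPartTail
  rw [pvScanA_eq_take]
  have hge := PySem.Chars.neg_one_le_find line.toList letter.toList
  have hc : (PySem.Chars.find line.toList letter.toList < 0) =
      (PySem.Chars.find line.toList letter.toList = -1) := by
    apply propext; constructor <;> intro <;> omega
  simp only [hc]
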